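-- pv_equiv track=rewrite | github.com/agreign/DeepLabCut_Code | rat_position_based_on_given_data.py | dic_time_in_zone_with_zeros_and_time
-- ===== SOURCE A (Python) =====
-- def dic_time_in_zone_with_zeros_and_time(edited_dic_time_in_position, num_lines):
--     dic_time_in_zone_with_zeros = {}
--     max_val = 0
--     for key, val in edited_dic_time_in_position.items():
--         if val[-1] > max_val:
--             max_val = val[-1]
--     for key, val in edited_dic_time_in_position.items():
--         dic_time_in_zone_with_zeros[key] = []
--         for i in range(0, max_val+1):
--             if i in val:
--                 dic_time_in_zone_with_zeros[key].append(i)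
--             else:
--                 dic_time_in_zone_with_zeros[key].append(0)
--     return dic_time_in_zone_with_zeros
-- ===== SOURCE B (Python) =====
-- def dic_time_in_zone_with_zeros_and_time(edited_dic_time_in_position, num_lines):
--     lasts = [val[-1] for val in edited_dic_time_in_position.values()]
--     max_val = max([0] + lasts)
--
--     def row(val):
--         slots = [0] * (max_val + 1)
--         for v in val:
--             if 0 <= v <= max_val:
--                 slots[v] = v
--         return slots
--
--     return {key: row(val) for key, val in edited_dic_time_in_position.items()}
-- ===== Notes on version B (the rewrite author's own statement) =====
-- stated objective: faster
-- what changed: Replaces A's two explicit dict-building loops with a gather (scan of range(0,max_val+1) with an O(len(val)) membership test at every index) by: max over a list of last elements, and a dict comprehension whose rows are built by scattering each in-range value of val into a pre-allocated all-zeros slot list.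
import Mathlib
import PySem

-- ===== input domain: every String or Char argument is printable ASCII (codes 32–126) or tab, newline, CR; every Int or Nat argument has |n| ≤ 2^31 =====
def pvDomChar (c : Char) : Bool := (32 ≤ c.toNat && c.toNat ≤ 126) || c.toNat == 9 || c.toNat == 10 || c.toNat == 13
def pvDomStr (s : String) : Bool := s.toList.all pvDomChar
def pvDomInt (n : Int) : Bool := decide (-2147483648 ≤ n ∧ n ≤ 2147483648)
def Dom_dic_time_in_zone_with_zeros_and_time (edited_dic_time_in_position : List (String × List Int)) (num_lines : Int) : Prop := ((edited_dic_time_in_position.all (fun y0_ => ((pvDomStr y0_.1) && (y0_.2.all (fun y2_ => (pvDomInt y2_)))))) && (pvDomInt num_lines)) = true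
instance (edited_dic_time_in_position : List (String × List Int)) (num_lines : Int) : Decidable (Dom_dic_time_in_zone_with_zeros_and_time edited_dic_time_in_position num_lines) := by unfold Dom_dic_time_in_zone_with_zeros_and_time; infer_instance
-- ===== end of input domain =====

-- B replaces A's two explicit dict-building loops by max over the list of last elements and a
-- dict comprehension whose rows scatter each in-range value into a pre-allocated zeros list;
-- equivalence of return values.
-- ===== PORT A =====
def dic_time_in_zone_with_zeros_and_time (edited_dic_time_in_position : List (String × List Int)) (num_lines : Int) : List (String × List Int) :=
  -- max_val loop: val[-1] is pyGet? · (-1); on Pre_ every val is nonempty so getD 0 is never taken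
  let max_val : Int := edited_dic_time_in_position.foldl
    (fun m kv => if ((PySem.List.pyGet? kv.2 (-1)).getD 0) > m then (PySem.List.pyGet? kv.2 (-1)).getD 0 else m) 0
  -- second loop: dic[key] = [] then append i or 0 for each i in range(0, max_val+1)
  (edited_dic_time_in_position.foldl
    (fun d kv => PySem.Dict.insert d kv.1
      ((PySem.List.pyRange 0 (max_val + 1) 1).foldl
        (fun acc i => if kv.2.contains i then acc ++ [i] else acc ++ [0]) []))
    PySem.Dict.empty).items

-- ===== PORT B =====
-- helper row(val): slots = [0]*(max_val+1); for v in val: if 0 <= v <= max_val: slots[v] = v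
def pvRow (max_val : Int) (val : List Int) : List Int :=
  val.foldl (fun slots v => if 0 ≤ v ∧ v ≤ max_val then PySem.List.pySetD slots v v else slots)
    (List.replicate (max_val + 1).toNat 0)

def dic_time_in_zone_with_zeros_and_time_alt (edited_dic_time_in_position : List (String × List Int)) (num_lines : Int) : List (String × List Int) :=
  -- lasts = [val[-1] for val in d.values()]; max_val = max([0] + lasts)
  let lasts : List Int := edited_dic_time_in_position.map (fun kv => (PySem.List.pyGet? kv.2 (-1)).getD 0)
  let max_val : Int := (PySem.List.max? (0 :: lasts) (fun y => y)).getD 0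
  -- {key: row(val) for key, val in d.items()}
  (PySem.Dict.ofList (edited_dic_time_in_position.map (fun kv => (kv.1, pvRow max_val kv.2)))).items

-- ===== PRECONDITION & SPEC =====
-- Pre_ excludes exactly the inputs with an empty value list, on which A raises IndexError at val[-1].
def Pre_dic_time_in_zone_with_zeros_and_time (edited_dic_time_in_position : List (String × List Int)) (num_lines : Int) : Prop :=
  ∀ p ∈ edited_dic_time_in_position, p.2 ≠ []
instance (edited_dic_time_in_position : List (String × List Int)) (num_lines : Int) : Decidable (Pre_dic_time_in_zone_with_zeros_and_time edited_dic_time_in_position num_lines) := by unfold Pre_dic_time_in_zone_with_zeros_and_time; infer_instance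
def pvWitness_dic_time_in_zone_with_zeros_and_time : (List (String × List Int)) × Int := ([("a", [1, 3]), ("b", [2])], 0)
def Spec_dic_time_in_zone_with_zeros_and_time (edited_dic_time_in_position : List (String × List Int)) (num_lines : Int) (out : List (String × List Int)) : Prop := out = dic_time_in_zone_with_zeros_and_time_alt edited_dic_time_in_position num_lines
instance (edited_dic_time_in_position : List (String × List Int)) (num_lines : Int) (out : List (String × List Int)) : Decidable (Spec_dic_time_in_zone_with_zeros_and_time edited_dic_time_in_position num_lines out) := by unfold Spec_dic_time_in_zone_with_zeros_and_time; infer_instance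

-- ===== CLAIM (what is proved, stated in full; the proofs are below) =====
def Claim_equal_dic_time_in_zone_with_zeros_and_time : Prop := ∀ (edited_dic_time_in_position : List (String × List Int)) (num_lines : Int), Dom_dic_time_in_zone_with_zeros_and_time edited_dic_time_in_position num_lines → Pre_dic_time_in_zone_with_zeros_and_time edited_dic_time_in_position num_lines → Spec_dic_time_in_zone_with_zeros_and_time edited_dic_time_in_position num_lines (dic_time_in_zone_with_zeros_and_time edited_dic_time_in_position num_lines)

-- ===== LEMMAS AND PROOFS =====

-- the scatter loop preserves length
lemma scatter_length (M : Int) (val slots : List Int) :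
    (val.foldl (fun s v => if 0 ≤ v ∧ v ≤ M then PySem.List.pySetD s v v else s) slots).length = slots.length := by
  induction val generalizing slots with
  | nil => rfl
  | cons v rest ih =>
    simp only [List.foldl_cons]
    split_ifs with h
    · rw [ih, PySem.List.pySetD_of_nonneg _ _ h.1, List.length_set]
    · exact ih slots

-- slot j after the scatter: j if j occurs in val (within range), else untouched
lemma scatter_get (M : Int) (val : List Int) (slots : List Int) (hlen : slots.length = (M + 1).toNat)
    (j : Nat) (hj : j < (M + 1).toNat) :
    (val.foldl (fun s v => if 0 ≤ v ∧ v ≤ M then PySem.List.pySetD s v v else s) slots)[j]? =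
      if (j : Int) ∈ val then some (j : Int) else slots[j]? := by
  have hjM : (j : Int) ≤ M := by omega
  induction val generalizing slots with
  | nil => simp
  | cons v rest ih =>
    simp only [List.foldl_cons, List.mem_cons]
    by_cases h : 0 ≤ v ∧ v ≤ M
    · rw [if_pos h, PySem.List.pySetD_of_nonneg _ _ h.1,
        ih _ (by rw [List.length_set]; exact hlen)]
      by_cases hrest : (j : Int) ∈ rest
      · simp [hrest]
      · simp only [hrest, or_false]
        by_cases hjv : (j : Int) = v
        · have hvj : v.toNat = j := by omega
          rw [if_pos hjv, hvj,
            List.getElem?_set_self' , List.getElem?_eq_getElem (by omega : j < slots.length)]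
          simp [hjv]
        · rw [List.getElem?_set_ne (by omega)]
          simp [hjv]
    · rw [if_neg h, ih _ hlen]
      have hjv : ¬ ((j : Int) = v) := by omega
      by_cases hrest : (j : Int) ∈ rest
      · simp [hrest]
      · simp [hrest, hjv]

-- A's gather row = B's scatter row, for 0 ≤ M
lemma gather_eq_scatter (M : Int) (hM : 0 ≤ M) (val : List Int) :
    (PySem.List.pyRange 0 (M + 1) 1).foldl (fun acc i => if val.contains i then acc ++ [i] else acc ++ [0]) [] =
    pvRow M val := by
  unfold pvRow
  have hL : ((PySem.List.pyRange 0 (M + 1) 1).foldl (fun acc i => if val.contains i then acc ++ [i] else acc ++ [0]) ([] : List Int)) =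
      (PySem.List.pyRange 0 (M + 1) 1).map (fun i => if val.contains i then i else 0) := by
    rw [show (fun (acc : List Int) i => if val.contains i then acc ++ [i] else acc ++ [0]) =
        (fun acc i => acc ++ [if val.contains i then i else 0]) from
      funext fun acc => funext fun i => by split_ifs <;> rfl]
    rw [PySem.List.foldl_append_singleton_eq_map, List.nil_append]
  rw [hL]
  have hcast : M + 1 = (((M + 1).toNat : Nat) : Int) := by omega
  apply List.ext_getElem?
  intro j
  by_cases hj : j < (M + 1).toNat
  · rw [scatter_get M val _ (by simp) j hj]
    have hmap := PySem.List.getElem?_map_pyRange_zero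
      (fun i => if val.contains i then i else 0) ((M + 1).toNat) j hj
    rw [← hcast] at hmap
    have hrep : (List.replicate (M + 1).toNat (0 : Int))[j]? = some 0 := by
      simp [hj]
    rw [hmap, hrep]
    by_cases hmem : (j : Int) ∈ val
    · simp [hmem]
    · simp [hmem]
  · have h1 : ((PySem.List.pyRange 0 (M + 1) 1).map (fun i => if val.contains i then i else 0))[j]? = none := by
      apply List.getElem?_eq_none
      simp only [List.length_map, PySem.List.length_pyRange_one]
      omega
    have h2 : ((val.foldl (fun s v => if 0 ≤ v ∧ v ≤ M then PySem.List.pySetD s v v else s) (List.replicate (M + 1).toNat 0)))[j]? = none := by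
      apply List.getElem?_eq_none
      rw [scatter_length]
      simp; omega
    rw [h1, h2]

-- A's running-max-with-if loop equals B's max([0] + lasts)
lemma maxfold_eq (xs : List (String × List Int)) :
    xs.foldl (fun m kv => if ((PySem.List.pyGet? kv.2 (-1)).getD 0) > m then ((PySem.List.pyGet? kv.2 (-1)).getD 0) else m) 0 =
    (PySem.List.max? (0 :: xs.map (fun kv => (PySem.List.pyGet? kv.2 (-1)).getD 0)) (fun y => y)).getD 0 := by
  rw [PySem.List.max?_id_cons, Option.getD_some, List.foldl_map]
  apply PySem.List.foldl_congr_mem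
  intro m kv _
  rcases le_or_gt ((PySem.List.pyGet? kv.2 (-1)).getD 0) m with h | h
  · rw [if_neg (by omega), max_eq_left h]
  · rw [if_pos h, max_eq_right (le_of_lt h)]

-- A's running max is nonnegative
lemma maxfold_nonneg (xs : List (String × List Int)) :
    0 ≤ xs.foldl (fun m kv => if ((PySem.List.pyGet? kv.2 (-1)).getD 0) > m then (PySem.List.pyGet? kv.2 (-1)).getD 0 else m) 0 := by
  have h : ∀ (m : Int), 0 ≤ m → 0 ≤ xs.foldl (fun m kv => if ((PySem.List.pyGet? kv.2 (-1)).getD 0) > m then (PySem.List.pyGet? kv.2 (-1)).getD 0 else m) m := by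
    intro m hm
    induction xs generalizing m with
    | nil => simpa
    | cons kv rest ih =>
      simp only [List.foldl_cons]
      split_ifs with h
      · exact ih _ (by omega)
      · exact ih _ hm
  exact h 0 le_rfl

-- ===== VERDICT (by name: the statement is the Claim_ definition above) =====
theorem dic_time_in_zone_with_zeros_and_time_spec : Claim_equal_dic_time_in_zone_with_zeros_and_time := by
  intro xs num_lines _ _
  unfold Spec_dic_time_in_zone_with_zeros_and_time dic_time_in_zone_with_zeros_and_time dic_time_in_zone_with_zeros_and_time_alt
  dsimp only
  rw [← maxfold_eq xs]
  congr 1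
  unfold PySem.Dict.ofList PySem.Dict.update
  rw [List.foldl_map]
  exact PySem.List.foldl_congr_mem _ _ _ _
    (fun d kv _ => by rw [gather_eq_scatter _ (maxfold_nonneg xs) kv.2])
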